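-- pv_equiv track=rewrite | github.com/svtlvsh/crypto-23-24 | cp2/razumnyi_fb-14_bolgov_fb-14_cp2/razik_bolgov_2.py | block_division
-- ===== SOURCE A (Python) =====
-- def block_division(text, size):
--     """ Divide text in blocks of the specific range """
--
--     blocks_list = []
--     for i in range(size):
--         block_str = ''
--
--         for j in range(i, len(text), size):
--             block_str += text[j]
--
--         blocks_list.append(block_str)
--
--     return blocks_list
-- ===== SOURCE B (Python) =====
-- def block_division(text, size):
--     """ Divide text in blocks of the specific range """
--
--     blocks_list = ['' for _ in range(size)]
--
--     if size > 0:
--         for k, ch in enumerate(text):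
--             blocks_list[k % size] += ch
--
--     return blocks_list
-- ===== Notes on version B (the rewrite author's own statement) =====
-- stated objective: alternative
-- what changed: Replaces the per-block column gathering (one strided inner scan of the text for each of the size blocks) by a single forward pass that distributes each character into bucket k % size.
import Mathlib
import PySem

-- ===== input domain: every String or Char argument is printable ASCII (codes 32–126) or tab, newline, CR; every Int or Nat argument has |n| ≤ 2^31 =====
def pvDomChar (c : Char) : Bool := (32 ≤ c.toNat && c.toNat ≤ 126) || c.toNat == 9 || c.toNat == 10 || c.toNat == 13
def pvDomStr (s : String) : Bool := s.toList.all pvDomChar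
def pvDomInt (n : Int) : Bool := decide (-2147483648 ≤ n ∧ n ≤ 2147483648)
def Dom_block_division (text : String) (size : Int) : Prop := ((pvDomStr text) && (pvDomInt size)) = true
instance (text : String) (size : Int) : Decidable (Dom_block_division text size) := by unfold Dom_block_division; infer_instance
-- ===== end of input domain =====

-- B replaces A's per-block strided gathering by a single forward pass distributing each
-- character into bucket k % size (alternative decomposition, same cost).

-- ===== PORT A =====
-- Transliteration of A: for each i in range(size), gather text[i], text[i+size], ….
-- Python strings are built on the List Char side (String.ofList at the end of each block);
-- text[j] is always in range here (j comes from range(i, len(text), size)), so pyGetD's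
-- default character is never used.
def block_division (text : String) (size : Int) : List String :=
  let cs := text.toList
  (PySem.List.pyRange 0 size 1).foldl
    (fun blocks_list i =>
      let block_str : List Char :=
        (PySem.List.pyRange i (cs.length : Int) size).foldl
          (fun s j => s ++ [PySem.List.pyGetD cs j ' ']) []
      blocks_list ++ [String.ofList block_str])
    []

-- ===== PORT B =====
-- Transliteration of Source B: blocks = [''] * size; if size > 0, one pass over
-- enumerate(text) doing blocks[k % size] += ch (read-append-write = getD + set;
-- k % size is always in range, so getD's default is never used).
def block_division_alt (text : String) (size : Int) : List String :=
  let blocks : List (List Char) := List.replicate size.toNat []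
  let blocks :=
    if 0 < size then
      (PySem.List.enumerate text.toList).foldl
        (fun bs kc =>
          bs.set (kc.1 % size).toNat (bs.getD (kc.1 % size).toNat [] ++ [kc.2]))
        blocks
    else blocks
  blocks.map String.ofList

-- ===== PRECONDITION & SPEC =====
def Spec_block_division (text : String) (size : Int) (out : List String) : Prop := out = block_division_alt text size
instance (text : String) (size : Int) (out : List String) : Decidable (Spec_block_division text size out) := by unfold Spec_block_division; infer_instance

-- ===== CLAIM (what is proved, stated in full; the proofs are below) =====
def Claim_equal_block_division : Prop := ∀ (text : String) (size : Int), Dom_block_division text size → Spec_block_division text size (block_division text size)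

-- ===== LEMMAS AND PROOFS =====

/-- Characters of `cs` landing in bucket `i` (mod `n`), when the first character of `cs`
has global index `m`. Both programs' block `i` is `colFrom n i cs 0`. -/
def colFrom (n i : Nat) : List Char → Nat → List Char
  | [], _ => []
  | c :: cs, m => (if m % n = i then [c] else []) ++ colFrom n i cs (m + 1)

lemma colFrom_append (n i : Nat) (xs ys : List Char) : ∀ m : Nat,
    colFrom n i (xs ++ ys) m = colFrom n i xs m ++ colFrom n i ys (m + xs.length) := by
  induction xs with
  | nil => intro m; simp [colFrom]
  | cons c xs IH =>
    intro m
    have h : m + (xs.length + 1) = (m + 1) + xs.length := by omega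
    simp only [List.cons_append, colFrom, IH (m + 1), List.append_assoc, List.length_cons, h]

lemma colFrom_add_n (n i : Nat) (ys : List Char) : ∀ m : Nat,
    colFrom n i ys (m + n) = colFrom n i ys m := by
  induction ys with
  | nil => intro m; simp [colFrom]
  | cons c ys IH =>
    intro m
    have h1 : (m + n) % n = m % n := Nat.add_mod_right m n
    have h2 : m + n + 1 = (m + 1) + n := by omega
    simp only [colFrom, h1, h2, IH (m + 1)]

lemma colFrom_short (n i : Nat) (hi : i < n) : ∀ (xs : List Char) (m : Nat),
    m + xs.length ≤ n →
    colFrom n i xs m = if m ≤ i ∧ i < m + xs.length then [xs.getD (i - m) ' '] else [] := by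
  intro xs
  induction xs with
  | nil => intro m _; simp only [colFrom, List.length_nil]; rw [if_neg (by omega)]
  | cons c xs IH =>
    intro m hm
    have hml : m < n := by simp at hm; omega
    have hmn : m % n = m := Nat.mod_eq_of_lt hml
    rw [colFrom, hmn, IH (m + 1) (by simp at hm ⊢; omega)]
    simp only [List.length_cons]
    by_cases hmi : m = i
    · subst hmi
      rw [if_pos rfl, if_neg (by omega), if_pos (by omega)]
      simp
    · rw [if_neg hmi]
      by_cases hin : m + 1 ≤ i ∧ i < m + 1 + xs.length
      · rw [if_pos hin, if_pos (by omega)]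
        have : i - m = (i - (m + 1)) + 1 := by omega
        simp [this]
      · rw [if_neg hin, if_neg (by omega)]
        simp

lemma colFrom_drop (n i : Nat) (_hn : 0 < n) (hi : i < n) (cs : List Char) :
    colFrom n i cs 0 =
      (if i < cs.length then [cs.getD i ' '] else []) ++ colFrom n i (cs.drop n) 0 := by
  conv_lhs => rw [← List.take_append_drop n cs, colFrom_append]
  have htl : (List.take n cs).length = min n cs.length := List.length_take
  congr 1
  · rw [colFrom_short n i hi _ 0 (by omega)]
    by_cases hiL : i < cs.length
    · rw [if_pos (by omega), if_pos hiL]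
      simp only [Nat.sub_zero]
      have : (List.take n cs).getD i ' ' = cs.getD i ' ' := by
        simp only [List.getD_eq_getElem?_getD, List.getElem?_take]
        rw [if_pos hi]
      rw [this]
    · rw [if_neg (by omega), if_neg hiL]
  · by_cases hL : cs.length ≤ n
    · rw [List.drop_eq_nil_of_le hL]
      simp [colFrom]
    · rw [htl, Nat.min_eq_left (by omega)]
      have h0 : (0 : Nat) + n = n := by omega
      rw [← h0, colFrom_add_n]

/-- A's strided index loop for block `i`, one `drop n` step. -/
lemma mapA_drop (n i : Nat) (hn : 0 < n) (hi : i < n) (cs : List Char) :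
    (PySem.List.pyRange (i : Int) (cs.length : Int) (n : Int)).map
        (fun j => PySem.List.pyGetD cs j ' ')
      = (if i < cs.length then [cs.getD i ' '] else [])
        ++ (PySem.List.pyRange (i : Int) ((cs.drop n).length : Int) (n : Int)).map
            (fun j => PySem.List.pyGetD (cs.drop n) j ' ') := by
  have hnI : (0 : Int) < (n : Int) := by exact_mod_cast hn
  rw [PySem.List.pyRange_of_pos _ _ hnI, PySem.List.pyRange_of_pos _ _ hnI]
  have hdl : (cs.drop n).length = cs.length - n := by simp
  by_cases hiL : i < cs.length
  · by_cases hdeep : n + i < cs.length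
    · -- both ranges nonempty; the first count is one more than the second
      have hc1 : (if (i : Int) < (cs.length : Int)
            then (((cs.length : Int) - i + n - 1) / n).toNat else 0)
          = (cs.length - i - 1) / n + 1 := by
        rw [if_pos (by exact_mod_cast hiL)]
        have he : (cs.length : Int) - i + n - 1 = ((cs.length - i - 1 + n : Nat) : Int) := by
          omega
        rw [he, ← Int.natCast_div, Int.toNat_natCast, Nat.add_div_right _ hn]
      have hc2 : (if (i : Int) < ((cs.drop n).length : Int)
            then ((((cs.drop n).length : Int) - i + n - 1) / n).toNat else 0)
          = (cs.length - i - 1) / n := by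
        rw [if_pos (by rw [hdl]; omega)]
        have he : ((cs.drop n).length : Int) - i + n - 1 = ((cs.length - i - 1 : Nat) : Int) := by
          rw [hdl]; omega
        rw [he, ← Int.natCast_div, Int.toNat_natCast]
      rw [hc1, hc2, List.range_succ_eq_map, List.map_cons, List.map_map, List.map_cons,
        List.map_map, List.map_map]
      have hhead : (i : Int) + n * ((0 : Nat) : Int) = ((i : Nat) : Int) := by push_cast; ring
      rw [hhead, PySem.List.pyGetD_natCast, if_pos hiL, List.singleton_append]
      congr 1
      apply List.map_congr_left
      intro k _
      simp only [Function.comp, Nat.succ_eq_add_one]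
      have e1 : (i : Int) + n * (((k + 1 : Nat)) : Int) = ((i + n * (k + 1) : Nat) : Int) := by
        push_cast; ring
      have e2 : (i : Int) + n * ((k : Nat) : Int) = ((i + n * k : Nat) : Int) := by
        push_cast; ring
      rw [e1, e2, PySem.List.pyGetD_natCast, PySem.List.pyGetD_natCast]
      simp only [List.getD_eq_getElem?_getD, List.getElem?_drop]
      have : n + (i + n * k) = i + n * (k + 1) := by ring
      rw [this]
    · -- the second range is empty, the first has exactly one element
      have hc2 : ¬ ((i : Int) < ((cs.drop n).length : Int)) := by rw [hdl]; omega
      have hc1 : (if (i : Int) < (cs.length : Int)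
            then (((cs.length : Int) - i + n - 1) / n).toNat else 0) = 1 := by
        rw [if_pos (by exact_mod_cast hiL)]
        have he : (cs.length : Int) - i + n - 1 = ((cs.length - i - 1 + n : Nat) : Int) := by
          omega
        rw [he, ← Int.natCast_div, Int.toNat_natCast]
        exact Nat.div_eq_of_lt_le (by omega) (by omega)
      rw [hc1, if_neg hc2, if_pos hiL]
      have hhead : (i : Int) + n * ((0 : Nat) : Int) = ((i : Nat) : Int) := by push_cast; ring
      simp only [List.range_one, List.range_zero, List.map_cons, List.map_nil, hhead,
        PySem.List.pyGetD_natCast, List.append_nil]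
  · -- i is past the end of cs: both ranges empty
    have h1 : ¬ ((i : Int) < (cs.length : Int)) := by exact_mod_cast hiL
    have h2 : ¬ ((i : Int) < ((cs.drop n).length : Int)) := by rw [hdl]; omega
    rw [if_neg h1, if_neg h2, if_neg hiL]
    simp

/-- A's block `i` equals `colFrom n i cs 0`. -/
lemma bucketA_eq (n i : Nat) (hn : 0 < n) (hi : i < n) : ∀ cs : List Char,
    (PySem.List.pyRange (i : Int) (cs.length : Int) (n : Int)).map
        (fun j => PySem.List.pyGetD cs j ' ')
      = colFrom n i cs 0 := by
  suffices h : ∀ (L : Nat) (cs : List Char), cs.length = L →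
      (PySem.List.pyRange (i : Int) (cs.length : Int) (n : Int)).map
        (fun j => PySem.List.pyGetD cs j ' ') = colFrom n i cs 0 by
    exact fun cs => h cs.length cs rfl
  intro L
  induction L using Nat.strong_induction_on with
  | _ L IH =>
    intro cs hL
    cases cs with
    | nil =>
      have hnI : (0 : Int) < (n : Int) := by exact_mod_cast hn
      rw [PySem.List.pyRange_of_pos _ _ hnI]
      rw [if_neg (by simp)]
      simp [colFrom]
    | cons c cs' =>
      rw [mapA_drop n i hn hi, colFrom_drop n i hn hi]
      congr 1
      exact IH ((c :: cs').drop n).length (by simp at hL ⊢; omega) _ rfl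

lemma set_map_range {α : Type} (n j : Nat) (_hj : j < n) (g : Nat → α) (v : α) :
    ((List.range n).map g).set j v = (List.range n).map (fun i => if i = j then v else g i) := by
  apply List.ext_getElem (by simp)
  intro k h1 h2
  simp only [List.getElem_set, List.getElem_map, List.getElem_range]
  split_ifs with h h' h'
  · rfl
  · omega
  · omega
  · rfl

/-- Invariant of B's distribution pass: starting from buckets `g`, folding the
enumerated tail (first global index `m`) appends `colFrom n i cs m` to bucket `i`. -/
lemma alt_fold (n : Nat) (hn : 0 < n) : ∀ (cs : List Char) (m : Nat) (g : Nat → List Char),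
    (PySem.List.enumerate cs (m : Int)).foldl
        (fun bs kc =>
          bs.set ((kc.1 % (n : Int)).toNat) (bs.getD ((kc.1 % (n : Int)).toNat) [] ++ [kc.2]))
        ((List.range n).map g)
      = (List.range n).map (fun i => g i ++ colFrom n i cs m) := by
  intro cs
  induction cs with
  | nil => intro m g; simp [PySem.List.enumerate_nil, colFrom]
  | cons c cs IH =>
    intro m g
    rw [PySem.List.enumerate_cons, List.foldl_cons]
    have hmn : (((m : Int)) % (n : Int)).toNat = m % n := by omega
    have hlt : m % n < n := Nat.mod_lt _ hn
    simp only [hmn]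
    rw [PySem.List.getD_map_range g n (m % n) [] hlt, set_map_range n (m % n) hlt g _]
    have hm1 : (m : Int) + 1 = ((m + 1 : Nat) : Int) := by push_cast; ring
    rw [hm1, IH (m + 1) _]
    apply List.map_congr_left
    intro i hi
    rw [List.mem_range] at hi
    by_cases hcase : i = m % n
    · subst hcase
      rw [if_pos rfl, colFrom, if_pos rfl]
      simp
    · have hne : ¬ (m % n = i) := fun h => hcase h.symm
      rw [if_neg hcase, colFrom, if_neg hne]
      simp

-- ===== VERDICT (by name: the statement is the Claim_ definition above) =====
theorem block_division_spec : Claim_equal_block_division := by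
  intro text size _
  show block_division text size = block_division_alt text size
  by_cases hpos : 0 < size
  · have hn0 : 0 < size.toNat := by omega
    have hsz : size = ((size.toNat : Nat) : Int) := by omega
    set n := size.toNat with hndef
    -- A side
    have hA : block_division text size
        = (List.range n).map (fun i => String.ofList (colFrom n i text.toList 0)) := by
      simp only [block_division, PySem.List.foldl_append_singleton_eq_map, List.nil_append]
      rw [hsz, PySem.List.pyRange_zero_natCast, List.map_map]
      apply List.map_congr_left
      intro i hi
      rw [List.mem_range] at hi
      simp only [Function.comp]
      rw [bucketA_eq n i hn0 hi text.toList]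
    -- B side
    have hrep : (List.replicate n ([] : List Char)) = (List.range n).map (fun _ => []) := by
      simp [List.map_const']
    have hB : block_division_alt text size
        = ((List.range n).map
            (fun i => ([] : List Char) ++ colFrom n i text.toList 0)).map String.ofList := by
      simp only [block_division_alt, if_pos hpos]
      rw [hrep, hsz]
      rw [show PySem.List.enumerate text.toList
            = PySem.List.enumerate text.toList (((0 : Nat) : Int)) from rfl,
        alt_fold n hn0 text.toList 0 (fun _ => [])]
    rw [hA, hB, List.map_map]
    apply List.map_congr_left
    intro i _
    simp [Function.comp]
  · -- size ≤ 0: A's outer range is empty and B allocates zero buckets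
    have h1 : PySem.List.pyRange 0 size 1 = [] := PySem.List.pyRange_one_eq_nil (by omega)
    have h2 : size.toNat = 0 := by omega
    simp [block_division, block_division_alt, h1, h2, hpos]
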